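-- pv_equiv track=rewrite | github.com/Kaito1223/Diploma | kernel/kernel_polunomial_pca_general.py | degree_d_multi_indices
-- ===== SOURCE A (Python) =====
-- import itertools
--
-- def degree_d_multi_indices(d, p):
--     """
--     Returns a lexicographically sorted list of all exponent vectors
--     (j1,...,jp) with non-negative integers summing to d.
--     """
--     #star and bar method
--     result = []
--     for dividers in itertools.combinations(range(d+p-1), p-1):
--         last = -1
--         index = []
--         for bar in dividers + (d+p-1,):
--             index.append(bar - last - 1)
--             last = bar
--         result.append(tuple(index))
--     return list(reversed(result))
-- ===== SOURCE B (Python) =====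
-- def degree_d_multi_indices(d, p):
--     """
--     Returns a lexicographically sorted list of all exponent vectors
--     (j1,...,jp) with non-negative integers summing to d.
--     """
--     if p <= 0:
--         raise ValueError("p must be positive")
--     if p == 1:
--         return [(d,)]
--     if d < 0:
--         return []
--     # walk the compositions of d into p parts in descending lexicographic
--     # order via the successor step: move one unit from the rightmost
--     # positive entry (among the first p-1) one slot to the right, together
--     # with everything that sat in the last slot.
--     c = [d] + [0] * (p - 1)
--     result = [tuple(c)]
--     while c[-1] != d:
--         rem = c[-1]
--         c[-1] = 0
--         i = p - 2
--         while c[i] == 0: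
--             i -= 1
--         c[i] -= 1
--         c[i + 1] = rem + 1
--         result.append(tuple(c))
--     return result
-- ===== Notes on version B (the rewrite author's own statement) =====
-- stated objective: alternative
-- what changed: Replaces the stars-and-bars enumeration via itertools.combinations of divider positions with an in-place successor loop that steps through the compositions of d into p parts directly in descending lexicographic order.
import Mathlib
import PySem

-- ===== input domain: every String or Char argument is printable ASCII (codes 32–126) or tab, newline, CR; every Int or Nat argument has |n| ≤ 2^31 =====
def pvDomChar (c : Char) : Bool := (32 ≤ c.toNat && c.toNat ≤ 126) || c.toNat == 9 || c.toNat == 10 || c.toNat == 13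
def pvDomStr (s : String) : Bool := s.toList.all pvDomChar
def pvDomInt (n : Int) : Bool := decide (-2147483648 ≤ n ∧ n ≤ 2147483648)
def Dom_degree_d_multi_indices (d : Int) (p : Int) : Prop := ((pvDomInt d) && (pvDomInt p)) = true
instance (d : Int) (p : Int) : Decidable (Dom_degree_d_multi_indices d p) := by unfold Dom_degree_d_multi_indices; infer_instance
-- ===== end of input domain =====

-- B replaces A's stars-and-bars enumeration via itertools.combinations with an in-place
-- descending-lex successor loop over the compositions (objective: alternative, same output-size cost).

-- ===== PORT A =====
-- itertools.combinations(xs, r) in lexicographic order (exact port of the library call)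
-- (like the C implementation, it returns at once when r exceeds the pool size)
def pvCombos (xs : List Int) (r : Nat) : List (List Int) :=
  match r, xs with
  | 0, _ => [[]]
  | _ + 1, [] => []
  | r + 1, x :: ys =>
    if ys.length < r then [] else (pvCombos ys r).map (x :: ·) ++ pvCombos ys (r + 1)

-- the inner 'for bar in dividers + (d+p-1,)' loop, carrying 'last'
def pvToIndex (last : Int) (bars : List Int) : List Int :=
  match bars with
  | [] => []
  | b :: bs => (b - last - 1) :: pvToIndex b bs

def degree_d_multi_indices (d : Int) (p : Int) : List (List Int) :=
  ((pvCombos (PySem.List.pyRange 0 (d + p - 1) 1) (p - 1).toNat).map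
      (fun ds => pvToIndex (-1) (ds ++ [d + p - 1]))).reverse

-- ===== PORT B =====
-- B-side helpers: the descending-lex successor step of Source B.
-- pvStep ports the in-place edit: rem = c[-1]; c[-1] = 0; scan i from the right
-- over zeros (pvStepAux walks the reversed prefix, collecting the skipped zeros);
-- c[i] -= 1; c[i+1] = rem + 1.  ([] on states Source B's loop never reaches.)
def pvStepAux (rem : Int) : List Int → List Int → List Int
  | [], _ => []
  | x :: r, zs => if x = 0 then pvStepAux rem r (0 :: zs) else r.reverse ++ ((x - 1) :: (rem + 1) :: zs)

def pvStep (c : List Int) : List Int :=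
  match c.reverse with
  | [] => []
  | rem :: rc => pvStepAux rem rc []

-- the while loop (fuel = an upper bound on the number of compositions, proved sufficient below)
def pvLoop (d : Int) : Nat → List Int → List (List Int) → List (List Int)
  | 0, _, acc => acc.reverse
  | fuel + 1, c, acc =>
    if c.getLastD 0 = d then acc.reverse
    else
      let c2 := pvStep c
      pvLoop d fuel c2 (c2 :: acc)

def degree_d_multi_indices_alt (d : Int) (p : Int) : List (List Int) :=
  if p ≤ 0 then []            -- Source B raises ValueError here (outside Pre_)
  else if p = 1 then [[d]]
  else if d < 0 then []
  else
    let c0 := d :: List.replicate (p.toNat - 1) 0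
    pvLoop d ((d.toNat + 1) ^ p.toNat) c0 [c0]

-- ===== PRECONDITION & SPEC =====
-- A raises ValueError (combinations with r = p-1 < 0) for p ≤ 0; B raises there too.
def Pre_degree_d_multi_indices (d : Int) (p : Int) : Prop := 1 ≤ p
instance (d : Int) (p : Int) : Decidable (Pre_degree_d_multi_indices d p) := by
  unfold Pre_degree_d_multi_indices; infer_instance
def pvWitness_degree_d_multi_indices : Int × Int := (3, 2)

def Spec_degree_d_multi_indices (d : Int) (p : Int) (out : List (List Int)) : Prop := out = degree_d_multi_indices_alt d p
instance (d : Int) (p : Int) (out : List (List Int)) : Decidable (Spec_degree_d_multi_indices d p out) := by unfold Spec_degree_d_multi_indices; infer_instance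

-- ===== CLAIM (what is proved, stated in full; the proofs are below) =====
def Claim_equal_degree_d_multi_indices : Prop := ∀ (d : Int) (p : Int), Dom_degree_d_multi_indices d p → Pre_degree_d_multi_indices d p → Spec_degree_d_multi_indices d p (degree_d_multi_indices d p)

-- ===== LEMMAS AND PROOFS =====

-- ---- the intermediate description: compositions of d into p parts, descending lex ----
def pvGen (d : Int) : Nat → List (List Int)
  | 0 => []
  | 1 => [[d]]
  | q + 2 =>
    (PySem.List.pyRange d (-1) (-1)).flatMap (fun j => (pvGen (d - j) (q + 1)).map (j :: ·))


-- [0, 1, ..., n-1] as integers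
def pvR (n : Nat) : List Int := (List.range n).map Int.ofNat

lemma pvR_succ (n : Nat) : pvR (n + 1) = 0 :: (pvR n).map (· + 1) := by
  simp [pvR, List.range_succ_eq_map, List.map_map, Function.comp_def]

lemma pvCombos_nil_of_short (xs : List Int) (r : Nat) (h : xs.length < r) :
    pvCombos xs r = [] := by
  cases xs with
  | nil => cases r with | zero => omega | succ r => rfl
  | cons x ys =>
    cases r with
    | zero => omega
    | succ r =>
      simp at h
      simp [pvCombos, if_pos h]

lemma pvCombos_cons (x : Int) (ys : List Int) (r : Nat) :
    pvCombos (x :: ys) (r + 1) = (pvCombos ys r).map (x :: ·) ++ pvCombos ys (r + 1) := by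
  by_cases h : ys.length < r
  · rw [show pvCombos (x :: ys) (r + 1) = if ys.length < r then [] else _ from rfl, if_pos h,
        pvCombos_nil_of_short ys r h, pvCombos_nil_of_short ys (r + 1) (by omega)]
    rfl
  · rw [show pvCombos (x :: ys) (r + 1) = if ys.length < r then [] else
        (pvCombos ys r).map (x :: ·) ++ pvCombos ys (r + 1) from rfl, if_neg h]

lemma pvCombos_shift (xs : List Int) (r : Nat) (c : Int) :
    pvCombos (xs.map (· + c)) r = (pvCombos xs r).map (List.map (· + c)) := by
  induction xs generalizing r with
  | nil => cases r <;> simp [pvCombos]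
  | cons x ys ih =>
    cases r with
    | zero => simp [pvCombos]
    | succ r =>
      rw [List.map_cons, pvCombos_cons, pvCombos_cons]
      simp [ih r, ih (r+1), List.map_map, Function.comp_def]

lemma pvToIndex_shift (l : Int) (c : Int) (bs : List Int) :
    pvToIndex (l + c) (bs.map (· + c)) = pvToIndex l bs := by
  induction bs generalizing l with
  | nil => rfl
  | cons b bs ih =>
    simp only [List.map_cons, pvToIndex, List.cons.injEq]
    exact ⟨by ring, ih b⟩

-- bump the head of a list
def pvIncHead : List Int → List Int
  | [] => []
  | x :: t => (x + 1) :: t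

lemma pvToIndex_shift1 (bs : List Int) :
    pvToIndex (-1) (bs.map (· + 1)) = pvIncHead (pvToIndex (-1) bs) := by
  cases bs with
  | nil => rfl
  | cons b bs =>
    simp only [List.map_cons, pvToIndex, pvIncHead, List.cons.injEq]
    exact ⟨by ring, pvToIndex_shift b 1 bs⟩

-- the countdown range(d,-1,-1) for d = k ≥ 0, split as [k..1] ++ [0]
lemma pyRange_down_succ (k : Nat) :
    PySem.List.pyRange ((k : Int) + 1) (-1) (-1)
      = ((PySem.List.pyRange (k : Int) (-1) (-1)).map (· + 1)) ++ [0] := by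
  rw [PySem.List.pyRange_neg_one, PySem.List.pyRange_neg_one]
  have h1 : ((k : Int) + 1 - -1).toNat = (k + 1) + 1 := by omega
  have h2 : ((k : Int) - -1).toNat = k + 1 := by omega
  rw [h1, h2, List.range_succ]
  simp [List.map_map, Function.comp_def]
  intro i _
  ring

lemma pvGen_succ_d (k q : Nat) :
    pvGen ((k : Int) + 1) (q + 2)
      = (pvGen (k : Int) (q + 2)).map pvIncHead
        ++ (pvGen ((k : Int) + 1) (q + 1)).map (0 :: ·) := by
  show (PySem.List.pyRange ((k:Int)+1) (-1) (-1)).flatMap _ = _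
  rw [pyRange_down_succ]
  simp only [List.flatMap_append, List.flatMap_map]
  congr 1
  · show _ = (List.flatMap (fun j => (pvGen ((k:Int) - j) (q+1)).map (j :: ·)) (PySem.List.pyRange (k:Int) (-1) (-1))).map pvIncHead
    rw [List.map_flatMap]
    apply List.flatMap_congr
    intro j hj
    have hj' : (k:Int) + 1 - (j + 1) = (k:Int) - j := by ring
    rw [hj']
    simp [List.map_map, Function.comp_def, pvIncHead]
  · simp

-- dividers starting with 0 ↦ exponent vector 0 :: (vector for the shifted tail)
lemma pv_mapf_zero (q m : Nat) :
    ((pvCombos ((pvR m).map (· + 1)) q).map (0 :: ·)).map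
        (fun ds => pvToIndex (-1) (ds ++ [(m : Int) + 1]))
      = ((pvCombos (pvR m) q).map
          (fun ds => pvToIndex (-1) (ds ++ [(m : Int)]))).map (0 :: ·) := by
  rw [pvCombos_shift]
  simp only [List.map_map]
  apply List.map_congr_left
  intro ds _
  show pvToIndex (-1) ((0 :: ds.map (· + 1)) ++ [(m : Int) + 1]) = _
  have h1 : (0 :: ds.map (· + 1)) ++ [(m : Int) + 1] = 0 :: ((ds ++ [(m : Int)]).map (· + 1)) := by
    simp
  rw [h1]
  show (0 - (-1) - 1) :: pvToIndex 0 ((ds ++ [(m : Int)]).map (· + 1)) = _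
  have h2 := pvToIndex_shift (-1) 1 (ds ++ [(m : Int)])
  norm_num at h2 ⊢
  exact h2

-- dividers all shifted by 1 ↦ exponent vector with bumped head
lemma pv_mapf_shift (q m : Nat) :
    (pvCombos ((pvR m).map (· + 1)) q).map
        (fun ds => pvToIndex (-1) (ds ++ [(m : Int) + 1]))
      = ((pvCombos (pvR m) q).map
          (fun ds => pvToIndex (-1) (ds ++ [(m : Int)]))).map pvIncHead := by
  rw [pvCombos_shift]
  simp only [List.map_map]
  apply List.map_congr_left
  intro ds _
  show pvToIndex (-1) (ds.map (· + 1) ++ [(m : Int) + 1]) = _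
  have h1 : ds.map (· + 1) ++ [(m : Int) + 1] = (ds ++ [(m : Int)]).map (· + 1) := by simp
  rw [h1, pvToIndex_shift1]
  rfl

lemma pyRange_down_zero : PySem.List.pyRange (0 : Int) (-1) (-1) = [0] := by decide

-- main bridge: p+1 parts, degree k
lemma pvMain (p k : Nat) :
    ((pvCombos (pvR (k + p)) p).map
        (fun ds => pvToIndex (-1) (ds ++ [((k + p : Nat) : Int)]))).reverse
      = pvGen (k : Int) (p + 1) := by
  induction p generalizing k with
  | zero =>
    simp [pvCombos, pvToIndex, pvGen]
  | succ q ihp =>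
    induction k with
    | zero =>
      simp only [Nat.zero_add]
      rw [pvR_succ]
      rw [pvCombos_cons]
      rw [pvCombos_nil_of_short _ (q + 1) (by simp [pvR])]
      have hc : ((q + 1 : Nat) : Int) = (q : Int) + 1 := by push_cast; ring
      rw [List.append_nil, hc, pv_mapf_zero, ← List.map_reverse]
      have hip := ihp 0
      simp only [Nat.zero_add, Nat.cast_zero] at hip
      rw [hip]
      rw [show ((0 : Nat) : Int) = (0 : Int) from rfl,
          show pvGen (0 : Int) (q + 1 + 1)
            = ((PySem.List.pyRange 0 (-1) (-1)).flatMap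
                fun j => (pvGen (0 - j) (q + 1)).map (j :: ·)) from rfl,
          pyRange_down_zero]
      simp
    | succ k ihk =>
      have hm : k + 1 + (q + 1) = (k + q + 1) + 1 := by omega
      rw [hm, pvR_succ]
      rw [pvCombos_cons]
      have hc : (((k + q + 1 + 1 : Nat)) : Int) = ((k + q + 1 : Nat) : Int) + 1 := by push_cast; ring
      rw [hc, List.map_append, List.reverse_append]
      rw [pv_mapf_zero, pv_mapf_shift]
      rw [show ∀ (X : List (List Int)), (X.map pvIncHead).reverse = X.reverse.map pvIncHead from
            fun X => by rw [← List.map_reverse]]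
      rw [show ∀ (X : List (List Int)), (X.map (0 :: ·)).reverse = X.reverse.map (0 :: ·) from
            fun X => by rw [← List.map_reverse]]
      have hik : (List.map (fun ds => pvToIndex (-1) (ds ++ [((k + q + 1 : Nat) : Int)]))
            (pvCombos (pvR (k + q + 1)) (q + 1))).reverse = pvGen (↑k) (q + 1 + 1) := by
        have := ihk
        simp only [show k + (q + 1) = k + q + 1 from by omega] at this
        exact this
      have hip : (List.map (fun ds => pvToIndex (-1) (ds ++ [((k + q + 1 : Nat) : Int)]))
            (pvCombos (pvR (k + q + 1)) q)).reverse = pvGen (↑(k + 1)) (q + 1) := by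
        have := ihp (k + 1)
        simp only [show k + 1 + q = k + q + 1 from by omega] at this
        exact this
      rw [hik, hip]
      have hgen := pvGen_succ_d k q
      have hck : ((k + 1 : Nat) : Int) = (k : Int) + 1 := by push_cast; ring
      rw [hck, hgen]

lemma pyRange_zero_up (n : Nat) : PySem.List.pyRange 0 (n : Int) 1 = pvR n := by
  rw [PySem.List.pyRange_one]
  simp [pvR]


-- ---- B's successor loop also produces pvGen ----

lemma pvRepShift (m : Nat) (zs : List Int) :
    List.replicate m (0 : Int) ++ 0 :: zs = 0 :: (List.replicate m 0 ++ zs) := by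
  induction m with
  | zero => rfl
  | succ m ih => simp [List.replicate_succ, ih]

lemma pvStepAux_skip (rem x : Int) (hx : x ≠ 0) :
    ∀ (m : Nat) (r zs : List Int),
      pvStepAux rem (List.replicate m 0 ++ x :: r) zs
        = r.reverse ++ ((x - 1) :: (rem + 1) :: (List.replicate m 0 ++ zs)) := by
  intro m
  induction m with
  | zero => intro r zs; simp [pvStepAux, if_neg hx]
  | succ m ih =>
    intro r zs
    rw [List.replicate_succ, List.cons_append]
    show pvStepAux rem (List.replicate m 0 ++ x :: r) (0 :: zs) = _
    rw [ih r (0 :: zs), pvRepShift]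
    simp [List.cons_append]

lemma pvStep_decomp (A : List Int) (x rem : Int) (m : Nat) (hx : x ≠ 0) :
    pvStep (A ++ x :: (List.replicate m 0 ++ [rem]))
      = A ++ ((x - 1) :: (rem + 1) :: List.replicate m 0) := by
  have hrev : (A ++ x :: (List.replicate m 0 ++ [rem])).reverse
      = rem :: (List.replicate m 0 ++ x :: A.reverse) := by
    simp [List.reverse_append]
  rw [pvStep, hrev]
  show pvStepAux rem (List.replicate m 0 ++ x :: A.reverse) [] = _
  rw [pvStepAux_skip rem x hx m A.reverse []]
  simp

-- adjacent elements of the enumeration: a is decomposable and b is its successor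
def pvS (a b : List Int) : Prop :=
  (∃ A x m rem, 0 < x ∧ a = A ++ x :: (List.replicate m 0 ++ [rem])) ∧ b = pvStep a

lemma pvS_incHead {a b : List Int} (h : pvS a b) : pvS (pvIncHead a) (pvIncHead b) := by
  obtain ⟨⟨A, x, m, rem, hx, rfl⟩, rfl⟩ := h
  cases A with
  | nil =>
    refine ⟨⟨[], x + 1, m, rem, by omega, by simp [pvIncHead]⟩, ?_⟩
    rw [pvStep_decomp [] x rem m (by omega)]
    show pvIncHead ([] ++ (x - 1) :: (rem + 1) :: List.replicate m 0)
        = pvStep (pvIncHead ([] ++ x :: (List.replicate m 0 ++ [rem])))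
    rw [show pvIncHead ([] ++ (x - 1) :: (rem + 1) :: List.replicate m 0)
          = (x - 1 + 1) :: (rem + 1) :: List.replicate m 0 from rfl,
        show pvIncHead ([] ++ x :: (List.replicate m 0 ++ [rem]))
          = [] ++ (x + 1) :: (List.replicate m 0 ++ [rem]) from rfl,
        pvStep_decomp [] (x + 1) rem m (by omega)]
    norm_num
  | cons y A' =>
    refine ⟨⟨(y + 1) :: A', x, m, rem, hx, by simp [pvIncHead]⟩, ?_⟩
    rw [pvStep_decomp (y :: A') x rem m (by omega)]
    show pvIncHead ((y :: A') ++ (x - 1) :: (rem + 1) :: List.replicate m 0)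
        = pvStep (pvIncHead ((y :: A') ++ x :: (List.replicate m 0 ++ [rem])))
    rw [show pvIncHead ((y :: A') ++ (x - 1) :: (rem + 1) :: List.replicate m 0)
          = ((y + 1) :: A') ++ (x - 1) :: (rem + 1) :: List.replicate m 0 from rfl,
        show pvIncHead ((y :: A') ++ x :: (List.replicate m 0 ++ [rem]))
          = ((y + 1) :: A') ++ x :: (List.replicate m 0 ++ [rem]) from rfl,
        pvStep_decomp ((y + 1) :: A') x rem m (by omega)]

lemma pvS_cons0 {a b : List Int} (h : pvS a b) : pvS (0 :: a) (0 :: b) := by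
  obtain ⟨⟨A, x, m, rem, hx, rfl⟩, rfl⟩ := h
  refine ⟨⟨0 :: A, x, m, rem, hx, by simp⟩, ?_⟩
  rw [pvStep_decomp A x rem m (by omega)]
  show 0 :: (A ++ (x - 1) :: (rem + 1) :: List.replicate m 0)
      = pvStep ((0 :: A) ++ x :: (List.replicate m 0 ++ [rem]))
  rw [pvStep_decomp (0 :: A) x rem m (by omega)]
  simp

lemma pvCast (k : Nat) : ((k + 1 : Nat) : Int) = (k : Int) + 1 := by push_cast; ring

lemma pvGen_zero_succ (q : Nat) :
    pvGen (0 : Int) (q + 2) = (pvGen (0 : Int) (q + 1)).map (0 :: ·) := by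
  rw [show pvGen (0 : Int) (q + 2)
        = ((PySem.List.pyRange 0 (-1) (-1)).flatMap
            fun j => (pvGen (0 - j) (q + 1)).map (j :: ·)) from rfl,
      pyRange_down_zero]
  simp

lemma pvDropLastMap {α β : Type} (f : α → β) (l : List α) :
    (l.map f).dropLast = l.dropLast.map f := by
  induction l with
  | nil => rfl
  | cons a l ih => cases l <;> simp_all

lemma pvGen_length_le (q : Nat) : ∀ k : Nat, (pvGen (k : Int) (q + 1)).length ≤ (k + 1) ^ (q + 1) := by
  induction q with
  | zero => intro k; simp [pvGen]
  | succ q ih =>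
    intro k
    induction k with
    | zero =>
      show (pvGen ((0 : Nat) : Int) (q + 2)).length ≤ (0 + 1) ^ (q + 2)
      rw [show ((0 : Nat) : Int) = (0 : Int) from rfl, pvGen_zero_succ]
      simpa using ih 0
    | succ k ihk =>
      show (pvGen ((k + 1 : Nat) : Int) (q + 2)).length ≤ (k + 1 + 1) ^ (q + 2)
      rw [pvCast, pvGen_succ_d]
      simp only [List.length_append, List.length_map]
      calc (pvGen (k : Int) (q + 2)).length + (pvGen ((k : Int) + 1) (q + 1)).length
          ≤ (k + 1) ^ (q + 2) + (k + 2) ^ (q + 1) := by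
            have h1 : (pvGen (k : Int) (q + 2)).length ≤ (k + 1) ^ (q + 2) := ihk
            have h2 : (pvGen ((k + 1 : Nat) : Int) (q + 1)).length ≤ (k + 2) ^ (q + 1) := ih (k + 1)
            rw [pvCast] at h2
            omega
        _ ≤ (k + 2) ^ (q + 1) * (k + 1) + (k + 2) ^ (q + 1) := by
            have := Nat.pow_le_pow_left (show k + 1 ≤ k + 2 by omega) (q + 1)
            calc (k + 1) ^ (q + 2) + (k + 2) ^ (q + 1)
                = (k + 1) ^ (q + 1) * (k + 1) + (k + 2) ^ (q + 1) := by rw [pow_succ]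
              _ ≤ (k + 2) ^ (q + 1) * (k + 1) + (k + 2) ^ (q + 1) :=
                  Nat.add_le_add_right (Nat.mul_le_mul_right _ this) _
        _ = (k + 2) ^ (q + 2) := by rw [pow_succ]; ring
      

lemma pvGen_mem (q : Nat) : ∀ (k : Nat) (c : List Int), c ∈ pvGen (k : Int) (q + 1) →
    c.length = q + 1 ∧ c.sum = (k : Int) ∧ ∀ y ∈ c, 0 ≤ y := by
  induction q with
  | zero =>
    intro k c hc
    simp [pvGen] at hc
    subst hc
    refine ⟨rfl, by simp, by simp⟩
  | succ q ih =>
    intro k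
    induction k with
    | zero =>
      intro c hc
      have hc' : c ∈ pvGen (0 : Int) (q + 2) := hc
      rw [pvGen_zero_succ] at hc'
      obtain ⟨y, hy, rfl⟩ := List.mem_map.mp hc'
      have hy' : y ∈ pvGen ((0 : Nat) : Int) (q + 1) := hy
      obtain ⟨h1, h2, h3⟩ := ih 0 y hy'
      refine ⟨by simp [h1], by simp [h2], ?_⟩
      intro z hz
      rcases List.mem_cons.mp hz with rfl | hz
      · omega
      · exact h3 z hz
    | succ k ihk =>
      intro c hc
      rw [pvCast, pvGen_succ_d] at hc
      rcases List.mem_append.mp hc with hc | hc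
      · obtain ⟨x, hx, rfl⟩ := List.mem_map.mp hc
        have hx' : x ∈ pvGen (k : Int) (q + 1 + 1) := hx
        obtain ⟨h1, h2, h3⟩ := ihk x hx'
        cases x with
        | nil => simp at h1
        | cons h t =>
          simp at h1 h2
          refine ⟨?_, ?_, ?_⟩
          · show (pvIncHead (h :: t)).length = q + 2
            simp [pvIncHead]
            omega
          · show (pvIncHead (h :: t)).sum = ((k + 1 : Nat) : Int)
            rw [pvCast]
            simp [pvIncHead]
            omega
          · intro z hz
            simp [pvIncHead] at hz
            rcases hz with rfl | hz
            · have := h3 h (by simp)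
              omega
            · exact h3 z (by simp [hz])
      · obtain ⟨y, hy, rfl⟩ := List.mem_map.mp hc
        rw [← pvCast] at hy
        obtain ⟨h1, h2, h3⟩ := ih (k + 1) y hy
        refine ⟨by simp [h1], by simp [h2], ?_⟩
        intro z hz
        rcases List.mem_cons.mp hz with rfl | hz
        · omega
        · exact h3 z hz

lemma pvGen_head (q : Nat) : ∀ k : Nat,
    (pvGen (k : Int) (q + 1)).head? = some ((k : Int) :: List.replicate q 0) := by
  induction q with
  | zero => intro k; simp [pvGen]
  | succ q ih =>
    intro k
    induction k with
    | zero =>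
      show (pvGen ((0 : Nat) : Int) (q + 2)).head? = some (((0 : Nat) : Int) :: List.replicate (q + 1) 0)
      rw [show ((0 : Nat) : Int) = (0 : Int) from rfl, pvGen_zero_succ, List.head?_map]
      have := ih 0
      rw [show ((0 : Nat) : Int) = (0 : Int) from rfl] at this
      rw [this]
      simp [List.replicate_succ]
    | succ k ihk =>
      show (pvGen ((k + 1 : Nat) : Int) (q + 2)).head?
          = some (((k + 1 : Nat) : Int) :: List.replicate (q + 1) 0)
      rw [pvCast, pvGen_succ_d]
      have hne : (pvGen (k : Int) (q + 2)).map pvIncHead ≠ [] := by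
        intro h
        have := ihk
        rw [show pvGen (k : Int) (q + 2) = [] from by
          cases hg : pvGen (k : Int) (q + 2) with
          | nil => rfl
          | cons a l => rw [hg] at h; simp at h] at this
        simp at this
      rw [List.head?_append_of_ne_nil _ hne, List.head?_map,
          show (pvGen (k : Int) (q + 2)).head? = some ((k : Int) :: List.replicate (q + 1) 0) from ihk]
      simp [pvIncHead]

lemma pvGen_last (q : Nat) : ∀ k : Nat,
    (pvGen (k : Int) (q + 1)).getLast? = some (List.replicate q (0 : Int) ++ [(k : Int)]) := by
  induction q with
  | zero => intro k; simp [pvGen]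
  | succ q ih =>
    intro k
    induction k with
    | zero =>
      show (pvGen ((0 : Nat) : Int) (q + 2)).getLast?
          = some (List.replicate (q + 1) (0 : Int) ++ [((0 : Nat) : Int)])
      rw [show ((0 : Nat) : Int) = (0 : Int) from rfl, pvGen_zero_succ, List.getLast?_map]
      have := ih 0
      rw [show ((0 : Nat) : Int) = (0 : Int) from rfl] at this
      rw [this]
      simp [List.replicate_succ]
    | succ k ihk =>
      show (pvGen ((k + 1 : Nat) : Int) (q + 2)).getLast?
          = some (List.replicate (q + 1) (0 : Int) ++ [((k + 1 : Nat) : Int)])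
      rw [pvCast, pvGen_succ_d, List.getLast?_append, List.getLast?_map, ← pvCast, ih (k + 1)]
      simp [List.replicate_succ]

lemma pvGen_getLast_le (q k : Nat) (x : List Int) (hx : x ∈ pvGen (k : Int) (q + 1))
    (y : Int) (hy : x.getLast? = some y) : y ≤ (k : Int) := by
  obtain ⟨hlen, hsum, hpos⟩ := pvGen_mem q k x hx
  have hne : x ≠ [] := by
    intro h
    rw [h] at hlen
    simp at hlen
  have hy' : x.getLast hne = y := by
    rw [List.getLast?_eq_some_getLast hne] at hy
    exact Option.some.inj hy
  have hsplit := List.dropLast_append_getLast hne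
  have hs : x.dropLast.sum + y = (k : Int) := by
    rw [← hsum]
    conv_rhs => rw [← hsplit]
    rw [List.sum_append, hy']
    simp
  have h0 : 0 ≤ x.dropLast.sum :=
    List.sum_nonneg (fun z hz => hpos z (List.mem_of_mem_dropLast hz))
  omega

lemma pvIncHead_getLast (x : List Int) (h : 2 ≤ x.length) :
    (pvIncHead x).getLast? = x.getLast? := by
  cases x with
  | nil => simp at h
  | cons a t =>
    cases t with
    | nil => simp at h
    | cons b u => simp [pvIncHead]

lemma pvConsZero_getLast (y : List Int) (h : y ≠ []) :
    ((0 : Int) :: y).getLast? = y.getLast? := by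
  cases y with
  | nil => exact absurd rfl h
  | cons b u => simp

-- any element of the X-part of pvGen_succ_d ends in a value ≤ k < k+1
lemma pvXpart (q k : Nat) (x : List Int) (hx : x ∈ pvGen (k : Int) (q + 2)) :
    (pvIncHead x).getLast? ≠ some ((k : Int) + 1) := by
  obtain ⟨hlen, _, _⟩ := pvGen_mem (q + 1) k x hx
  rw [pvIncHead_getLast x (by omega)]
  intro hlast
  have := pvGen_getLast_le (q + 1) k x hx _ hlast
  omega

lemma pvGen_ne_nil (q k : Nat) : pvGen (k : Int) (q + 1) ≠ [] := by
  intro h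
  have := pvGen_head q k
  rw [h] at this
  simp at this

lemma pvGen_dropLast : ∀ (q k : Nat) (c : List Int),
    c ∈ (pvGen (k : Int) (q + 2)).dropLast → c.getLast? ≠ some (k : Int) := by
  intro q
  induction q with
  | zero =>
    intro k c hc
    cases k with
    | zero =>
      rw [show ((0 : Nat) : Int) = (0 : Int) from rfl] at hc
      rw [show pvGen (0 : Int) 2 = [[0, 0]] from by decide] at hc
      simp at hc
    | succ k =>
      rw [show ((k + 1 : Nat) : Int) = (k : Int) + 1 from pvCast k, pvGen_succ_d] at hc
      have hY : ((pvGen ((k : Int) + 1) 1).map ((0 : Int) :: ·)) ≠ [] := by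
        have h0 := pvGen_ne_nil 0 (k + 1)
        rw [pvCast k] at h0
        intro h
        exact h0 (List.map_eq_nil_iff.mp h)
      rw [List.dropLast_append_of_ne_nil hY] at hc
      rcases List.mem_append.mp hc with hc | hc
      · obtain ⟨x, hx, rfl⟩ := List.mem_map.mp hc
        rw [show ((k + 1 : Nat) : Int) = (k : Int) + 1 from pvCast k]
        exact pvXpart 0 k x hx
      · rw [← pvCast, show pvGen ((k + 1 : Nat) : Int) 1 = [[((k + 1 : Nat) : Int)]] from rfl] at hc
        simp at hc
  | succ q ih =>
    intro k c hc
    cases k with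
    | zero =>
      have hc' : c ∈ (pvGen (0 : Int) (q + 3)).dropLast := hc
      rw [show ((0 : Nat) : Int) = (0 : Int) from rfl]
      rw [show pvGen (0 : Int) (q + 3) = (pvGen (0 : Int) (q + 2)).map ((0 : Int) :: ·) from
            pvGen_zero_succ (q + 1), pvDropLastMap] at hc'
      obtain ⟨y, hy, rfl⟩ := List.mem_map.mp hc'
      have hymem : y ∈ pvGen ((0 : Nat) : Int) (q + 2) := List.mem_of_mem_dropLast hy
      have hne : y ≠ [] := by
        obtain ⟨hlen, _, _⟩ := pvGen_mem (q + 1) 0 y hymem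
        intro h; rw [h] at hlen; simp at hlen
      rw [pvConsZero_getLast y hne]
      exact ih 0 y hy
    | succ k =>
      rw [show ((k + 1 : Nat) : Int) = (k : Int) + 1 from pvCast k] at hc ⊢
      rw [show pvGen ((k : Int) + 1) (q + 3)
            = (pvGen (k : Int) (q + 3)).map pvIncHead
              ++ (pvGen ((k : Int) + 1) (q + 2)).map ((0 : Int) :: ·) from
            pvGen_succ_d k (q + 1)] at hc
      have hY : ((pvGen ((k : Int) + 1) (q + 2)).map ((0 : Int) :: ·)) ≠ [] := by
        have h0 := pvGen_ne_nil (q + 1) (k + 1)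
        rw [pvCast k] at h0
        intro h
        exact h0 (List.map_eq_nil_iff.mp h)
      rw [List.dropLast_append_of_ne_nil hY] at hc
      rcases List.mem_append.mp hc with hc | hc
      · obtain ⟨x, hx, rfl⟩ := List.mem_map.mp hc
        exact pvXpart (q + 1) k x hx
      · rw [pvDropLastMap] at hc
        obtain ⟨y, hy, rfl⟩ := List.mem_map.mp hc
        have hymem : y ∈ pvGen ((k : Int) + 1) (q + 2) := List.mem_of_mem_dropLast hy
        rw [← pvCast] at hymem
        have hne : y ≠ [] := by
          obtain ⟨hlen, _, _⟩ := pvGen_mem (q + 1) (k + 1) y hymem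
          intro h; rw [h] at hlen; simp at hlen
        rw [pvConsZero_getLast y hne]
        have := ih (k + 1) y (by rw [← pvCast] at hy; exact hy)
        rw [pvCast] at this
        exact this

-- the junction between the X- and Y-blocks of pvGen_succ_d is a successor step
lemma pvJunction (q k : Nat) :
    pvS (pvIncHead (List.replicate (q + 1) (0 : Int) ++ [(k : Int)]))
        ((0 : Int) :: (((k : Int) + 1) :: List.replicate q 0)) := by
  have h1 : pvIncHead (List.replicate (q + 1) (0 : Int) ++ [(k : Int)])
      = [] ++ (1 : Int) :: (List.replicate q 0 ++ [(k : Int)]) := by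
    simp [List.replicate_succ, pvIncHead]
  refine ⟨⟨[], 1, q, (k : Int), one_pos, h1⟩, ?_⟩
  rw [h1, pvStep_decomp [] 1 (k : Int) q (by omega)]
  norm_num

lemma pvGen_chain : ∀ (q k : Nat), List.IsChain pvS (pvGen (k : Int) (q + 2)) := by
  intro q
  induction q with
  | zero =>
    intro k
    induction k with
    | zero =>
      rw [show ((0 : Nat) : Int) = (0 : Int) from rfl,
          show pvGen (0 : Int) 2 = [[0, 0]] from by decide]
      exact List.IsChain.singleton _
    | succ k ihk =>
      rw [pvCast k, pvGen_succ_d, List.isChain_append]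
      refine ⟨?_, ?_, ?_⟩
      · rw [List.isChain_map]
        exact ihk.imp (fun a b h => pvS_incHead h)
      · rw [show pvGen ((k : Int) + 1) 1 = [[(k : Int) + 1]] from rfl]
        exact List.IsChain.singleton _
      · intro x hx y hy
        rw [List.getLast?_map,
            show (pvGen (k : Int) 2).getLast?
              = some (List.replicate 1 (0 : Int) ++ [(k : Int)]) from pvGen_last 1 k] at hx
        rw [List.head?_map, show pvGen ((k : Int) + 1) 1 = [[(k : Int) + 1]] from rfl] at hy
        simp at hx hy
        subst hx
        subst hy
        exact pvJunction 0 k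
  | succ q ih =>
    intro k
    induction k with
    | zero =>
      rw [show ((0 : Nat) : Int) = (0 : Int) from rfl,
          show pvGen (0 : Int) (q + 3)
            = (pvGen (0 : Int) (q + 2)).map ((0 : Int) :: ·) from pvGen_zero_succ (q + 1),
          List.isChain_map]
      have := ih 0
      rw [show ((0 : Nat) : Int) = (0 : Int) from rfl] at this
      exact this.imp (fun a b h => pvS_cons0 h)
    | succ k ihk =>
      rw [pvCast k,
          show pvGen ((k : Int) + 1) (q + 3)
            = (pvGen (k : Int) (q + 3)).map pvIncHead
              ++ (pvGen ((k : Int) + 1) (q + 2)).map ((0 : Int) :: ·) from pvGen_succ_d k (q + 1),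
          List.isChain_append]
      refine ⟨?_, ?_, ?_⟩
      · rw [List.isChain_map]
        exact ihk.imp (fun a b h => pvS_incHead h)
      · rw [List.isChain_map]
        have := ih (k + 1)
        rw [pvCast k] at this
        exact this.imp (fun a b h => pvS_cons0 h)
      · intro x hx y hy
        rw [List.getLast?_map,
            show (pvGen (k : Int) (q + 3)).getLast?
              = some (List.replicate (q + 2) (0 : Int) ++ [(k : Int)]) from pvGen_last (q + 2) k] at hx
        have hh := pvGen_head (q + 1) (k + 1)
        rw [pvCast k] at hh
        rw [List.head?_map,
            show (pvGen ((k : Int) + 1) (q + 2)).head?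
              = some (((k : Int) + 1) :: List.replicate (q + 1) 0) from hh] at hy
        simp at hx hy
        subst hx
        subst hy
        exact pvJunction (q + 1) k

lemma pvLoop_run (d : Int) : ∀ (rest : List (List Int)) (c : List Int)
    (acc : List (List Int)) (fuel : Nat),
    List.IsChain pvS (c :: rest) →
    (∀ a ∈ (c :: rest).dropLast, a.getLastD 0 ≠ d) →
    ((c :: rest).getLast (by simp)).getLastD 0 = d →
    rest.length ≤ fuel →
    pvLoop d fuel c acc = acc.reverse ++ rest := by
  intro rest
  induction rest with
  | nil =>
    intro c acc fuel _ _ hlast _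
    simp at hlast
    cases fuel with
    | zero => simp [pvLoop]
    | succ f => simp [pvLoop, if_pos hlast]
  | cons b rest' ih =>
    intro c acc fuel hchain hdrop hlast hfuel
    cases fuel with
    | zero => simp at hfuel
    | succ f =>
      have hc : c.getLastD 0 ≠ d := by
        apply hdrop
        simp
      have hstep : b = pvStep c := (List.isChain_cons_cons.mp hchain).1.2
      rw [show pvLoop d (f + 1) c acc
            = if c.getLastD 0 = d then acc.reverse
              else pvLoop d f (pvStep c) (pvStep c :: acc) from rfl,
          if_neg hc, ← hstep]
      rw [ih b (b :: acc) f ?_ ?_ ?_ (by simpa using hfuel)]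
      · simp
      · exact (List.isChain_cons_cons.mp hchain).2
      · intro a ha
        apply hdrop
        rcases rest' with _ | ⟨r, rs⟩
        · simp at ha
        · simp at ha ⊢
          tauto
      · simpa using hlast

lemma pvAlt_eq_gen (d p : Int) (hp : 1 ≤ p) :
    degree_d_multi_indices_alt d p = pvGen d p.toNat := by
  unfold degree_d_multi_indices_alt
  rw [if_neg (by omega)]
  by_cases h1 : p = 1
  · subst h1
    rw [if_pos rfl]
    rfl
  · rw [if_neg h1]
    obtain ⟨q, hq⟩ : ∃ q : Nat, p.toNat = q + 2 := ⟨p.toNat - 2, by omega⟩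
    by_cases hd : d < 0
    · rw [if_pos hd, hq]
      rw [show pvGen d (q + 2)
            = ((PySem.List.pyRange d (-1) (-1)).flatMap
                fun j => (pvGen (d - j) (q + 1)).map (j :: ·)) from rfl,
          PySem.List.pyRange_neg_one_eq_nil (by omega)]
      rfl
    · rw [if_neg hd]
      obtain ⟨k, rfl⟩ : ∃ k : Nat, d = (k : Int) := ⟨d.toNat, by omega⟩
      rw [hq]
      have hhead := pvGen_head (q + 1) k
      cases hL : pvGen (k : Int) (q + 2) with
      | nil => rw [hL] at hhead; simp at hhead
      | cons c0 rest =>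
        rw [hL] at hhead
        simp at hhead
        have hc0 : c0 = (k : Int) :: List.replicate (q + 1) 0 := hhead
        have hrun := pvLoop_run (k : Int) rest c0 [c0] ((k + 1) ^ (q + 2)) ?_ ?_ ?_ ?_
        · show pvLoop (k : Int) (((k : Int).toNat + 1) ^ (q + 2))
              ((k : Int) :: List.replicate (q + 2 - 1) 0)
              [(k : Int) :: List.replicate (q + 2 - 1) 0] = c0 :: rest
          rw [show ((k : Int).toNat + 1) = k + 1 from by simp,
              show (q + 2 - 1 : Nat) = q + 1 from rfl, ← hc0, hrun]
          simp
        · rw [← hL]; exact pvGen_chain q k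
        · intro a ha
          have ha' : a ∈ (pvGen (k : Int) (q + 2)).dropLast := by rw [hL]; exact ha
          have hne : a ≠ [] := by
            have hmem := List.mem_of_mem_dropLast ha'
            obtain ⟨hlen, _, _⟩ := pvGen_mem (q + 1) k a hmem
            intro h; rw [h] at hlen; simp at hlen
          have hgl := pvGen_dropLast q k a ha'
          rw [List.getLastD_eq_getLast?]
          cases hga : a.getLast? with
          | none => rw [List.getLast?_eq_none_iff] at hga; exact absurd hga hne
          | some y =>
            rw [hga] at hgl
            simp
            intro h
            exact hgl (by rw [h])
        · have hlast := pvGen_last (q + 1) k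
          rw [hL] at hlast
          rw [List.getLast?_eq_some_getLast (by simp)] at hlast
          have := Option.some.inj hlast
          rw [this, List.getLastD_eq_getLast?]
          simp
        · have hlen : (pvGen (k : Int) (q + 2)).length ≤ (k + 1) ^ (q + 2) :=
            pvGen_length_le (q + 1) k
          rw [hL] at hlen
          simp at hlen
          omega

-- ===== VERDICT (by name: the statement is the Claim_ definition above) =====
theorem degree_d_multi_indices_spec : Claim_equal_degree_d_multi_indices := by
  intro d p _ hp
  show degree_d_multi_indices d p = degree_d_multi_indices_alt d p
  replace hp : 1 ≤ p := hp
  obtain ⟨q, rfl⟩ : ∃ q : Nat, p = (q : Int) + 1 := ⟨(p - 1).toNat, by omega⟩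
  have h1 : ((q : Int) + 1 - 1).toNat = q := by omega
  have h2 : ((q : Int) + 1).toNat = q + 1 := by omega
  rw [pvAlt_eq_gen d _ hp]
  unfold degree_d_multi_indices
  rw [h1, h2]
  rcases (em (0 ≤ d)) with hd | hd
  · obtain ⟨k, rfl⟩ : ∃ k : Nat, d = (k : Int) := ⟨d.toNat, by omega⟩
    have h3 : (k : Int) + ((q : Int) + 1) - 1 = ((k + q : Nat) : Int) := by push_cast; ring
    rw [h3, pyRange_zero_up]
    exact pvMain q k
  · cases q with
    | zero =>
      have h4 : (d : Int) + (((0 : Nat) : Int) + 1) - 1 = d := by push_cast; ring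
      rw [h4, PySem.List.pyRange_one_eq_nil (by omega)]
      show [pvToIndex (-1) ([] ++ [d])].reverse = [[d]]
      simp [pvToIndex]
    | succ q =>
      rw [pvCombos_nil_of_short _ (q + 1)
            (by rw [PySem.List.length_pyRange_one]; push_cast; omega)]
      show ([] : List (List Int)) = pvGen d (q + 1 + 1)
      rw [show pvGen d (q + 1 + 1)
            = ((PySem.List.pyRange d (-1) (-1)).flatMap
                fun j => (pvGen (d - j) (q + 1)).map (j :: ·)) from rfl,
          PySem.List.pyRange_neg_one_eq_nil (by omega)]
      rfl
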